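-- pv_equiv track=rewrite | github.com/j4asper/AdventOfCode | 2022/3/Part 2.py | divide_into_groups_of_three
-- ===== SOURCE A (Python) =====
-- def divide_into_groups_of_three(all_rucksacks:list):
--     rucksack_groups = list()
--     current_rucksack_group = list()
--     for rucksack in all_rucksacks:
--         current_rucksack_group.append(rucksack.strip())
--         if len(current_rucksack_group) == 3:
--             rucksack_groups.append(current_rucksack_group.copy())
--             current_rucksack_group.clear()
--     return rucksack_groups
-- ===== SOURCE B (Python) =====
-- def divide_into_groups_of_three(all_rucksacks: list):
--     return [[rucksack.strip() for rucksack in all_rucksacks[i:i + 3]]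
--             for i in range(0, len(all_rucksacks) // 3 * 3, 3)]
-- ===== Notes on version B (the rewrite author's own statement) =====
-- stated objective: simpler
-- what changed: Replaces the accumulate-buffer-and-flush loop (running group list, append/copy/clear) with a single comprehension over chunk-start indices range(0, len//3*3, 3) that slices each triple directly.
import Mathlib
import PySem

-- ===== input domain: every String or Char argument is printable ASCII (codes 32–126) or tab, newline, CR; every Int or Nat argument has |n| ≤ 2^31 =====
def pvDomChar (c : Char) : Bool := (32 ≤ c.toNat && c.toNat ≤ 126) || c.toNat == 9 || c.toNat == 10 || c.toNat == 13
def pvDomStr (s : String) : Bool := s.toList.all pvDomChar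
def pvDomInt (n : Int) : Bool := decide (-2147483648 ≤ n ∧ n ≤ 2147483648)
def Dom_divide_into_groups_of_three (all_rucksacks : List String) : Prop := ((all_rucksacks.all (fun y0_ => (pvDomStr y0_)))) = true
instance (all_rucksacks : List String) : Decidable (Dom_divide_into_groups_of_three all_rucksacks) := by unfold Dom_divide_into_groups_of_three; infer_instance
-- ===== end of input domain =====

-- B replaces A's accumulate-and-flush group buffer by a comprehension over chunk-start indices with slicing (objective: simpler).

-- ===== PORT A =====
-- loop body: append the stripped rucksack to the running group; flush it when it reaches 3
def aStep (st : List (List String) × List String) (rucksack : String) :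
    List (List String) × List String :=
  let cur := st.2 ++ [PySem.Str.strip rucksack]
  if cur.length = 3 then (st.1 ++ [cur], []) else (st.1, cur)

-- for rucksack in all_rucksacks: aStep; return the collected groups
def divide_into_groups_of_three (all_rucksacks : List String) : List (List String) :=
  (all_rucksacks.foldl aStep ([], [])).1

-- ===== PORT B =====
-- [[r.strip() for r in xs[i:i+3]] for i in range(0, len(xs)//3*3, 3)]
def divide_into_groups_of_three_alt (all_rucksacks : List String) : List (List String) :=
  (PySem.List.pyRange 0 (PySem.Int.floordiv (all_rucksacks.length : Int) 3 * 3) 3).map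
    (fun i => (PySem.List.slice all_rucksacks (some i) (some (i + 3))).map PySem.Str.strip)

-- ===== PRECONDITION & SPEC =====
def Spec_divide_into_groups_of_three (all_rucksacks : List String) (out : List (List String)) : Prop := out = divide_into_groups_of_three_alt all_rucksacks
instance (all_rucksacks : List String) (out : List (List String)) : Decidable (Spec_divide_into_groups_of_three all_rucksacks out) := by unfold Spec_divide_into_groups_of_three; infer_instance

-- ===== CLAIM (what is proved, stated in full; the proofs are below) =====
def Claim_equal_divide_into_groups_of_three : Prop := ∀ (all_rucksacks : List String), Dom_divide_into_groups_of_three all_rucksacks → Spec_divide_into_groups_of_three all_rucksacks (divide_into_groups_of_three all_rucksacks)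

-- ===== LEMMAS AND PROOFS =====

-- reference form: take stripped triples until fewer than 3 remain
def chunk3 : List String → List (List String)
  | a :: b :: c :: rest =>
      [PySem.Str.strip a, PySem.Str.strip b, PySem.Str.strip c] :: chunk3 rest
  | _ => []

theorem aLoop_eq_chunk3 (xs : List String) (groups : List (List String)) :
    (xs.foldl aStep (groups, [])).1 = groups ++ chunk3 xs := by
  fun_induction chunk3 xs generalizing groups with
  | case1 a b c rest ih =>
      have h1 : aStep (groups, []) a = (groups, [PySem.Str.strip a]) := by simp [aStep]
      have h2 : aStep (groups, [PySem.Str.strip a]) b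
          = (groups, [PySem.Str.strip a, PySem.Str.strip b]) := by simp [aStep]
      have h3 : aStep (groups, [PySem.Str.strip a, PySem.Str.strip b]) c
          = (groups ++ [[PySem.Str.strip a, PySem.Str.strip b, PySem.Str.strip c]], []) := by
        simp [aStep]
      rw [List.foldl_cons, h1, List.foldl_cons, h2, List.foldl_cons, h3, ih]
      simp
  | case2 l h =>
      rcases l with _ | ⟨a, _ | ⟨b, _ | ⟨c, t⟩⟩⟩
      · simp
      · simp [List.foldl, aStep]
      · simp [List.foldl, aStep]
      · exact absurd rfl (by intro hh; exact (h a b c t hh).elim)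

theorem chunk3_eq_map_range (xs : List String) :
    chunk3 xs = (List.range (xs.length / 3)).map
      (fun k => ((xs.drop (3 * k)).take 3).map PySem.Str.strip) := by
  fun_induction chunk3 xs with
  | case1 a b c rest ih =>
      have hlen : (a :: b :: c :: rest).length / 3 = rest.length / 3 + 1 := by
        simp; omega
      have hd : ∀ (k : Nat), List.drop (3 * (k + 1)) (a :: b :: c :: rest) = List.drop (3 * k) rest := by
        intro k
        rw [show 3 * (k + 1) = 3 + 3 * k by ring, ← List.drop_drop]
        simp
      rw [hlen, List.range_succ_eq_map, ih]
      simp only [List.map_cons, List.map_map]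
      refine List.cons_eq_cons.mpr ⟨by simp, ?_⟩
      apply List.map_congr_left
      intro k _
      simp only [Function.comp, Nat.succ_eq_add_one, hd]
  | case2 l h =>
      rcases l with _ | ⟨a, _ | ⟨b, _ | ⟨c, t⟩⟩⟩
      · simp
      · simp
      · simp
      · exact absurd rfl (by intro hh; exact (h a b c t hh).elim)

theorem alt_eq_chunk3 (xs : List String) :
    divide_into_groups_of_three_alt xs = chunk3 xs := by
  unfold divide_into_groups_of_three_alt
  have hm : PySem.Int.floordiv (xs.length : Int) 3 * 3 = ((3 * (xs.length / 3) : Nat) : Int) := by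
    rw [PySem.Int.floordiv_eq_ediv_of_pos (by norm_num)]
    push_cast
    omega
  rw [hm, PySem.List.pyRange_of_pos _ _ (by norm_num : (0:Int) < 3)]
  have hcount : (if (0:Int) < ((3 * (xs.length / 3) : Nat) : Int)
      then ((((3 * (xs.length / 3) : Nat) : Int) - 0 + 3 - 1) / 3).toNat else 0)
      = xs.length / 3 := by
    split_ifs with h
    · omega
    · omega
  rw [hcount, List.map_map, chunk3_eq_map_range]
  apply List.map_congr_left
  intro k _
  have h3 : (0 : Int) + 3 * (k : Int) = ((3 * k : Nat) : Int) := by push_cast; ring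
  simp only [Function.comp]
  rw [h3]
  have hs : PySem.List.slice xs (some ((3 * k : Nat) : Int)) (some (((3 * k : Nat) : Int) + ((3:Nat) : Int))) = (xs.drop (3 * k)).take 3 :=
    PySem.List.slice_natCast_add xs (3 * k) 3
  norm_num at hs ⊢
  rw [hs]
  simp [List.map_take, List.map_drop]

-- ===== VERDICT (by name: the statement is the Claim_ definition above) =====
theorem divide_into_groups_of_three_spec : Claim_equal_divide_into_groups_of_three := by
  intro xs _
  unfold Spec_divide_into_groups_of_three divide_into_groups_of_three
  rw [alt_eq_chunk3, aLoop_eq_chunk3 xs []]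
  simp
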